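-- pv_equiv track=rewrite | github.com/MrBrantCode/unitest_baseline | mut_generate/mist_train_cf/cf_104512/solution.py | group_and_sort
-- ===== SOURCE A (Python) =====
-- def group_and_sort(numbers):
--     # Create an empty dictionary to store the groups
--     groups = {}
--
--     # Group the numbers based on their last digit
--     for number in numbers:
--         last_digit = number % 10
--         if last_digit in groups:
--             groups[last_digit].append(number)
--         else:
--             groups[last_digit] = [number]
--
--     # Sort each group in ascending order
--     for key in groups:
--         groups[key].sort()
--
--     # Convert the dictionary to a list of lists
--     result = [groups[key] for key in sorted(groups.keys())]
--
--     return result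
-- ===== SOURCE B (Python) =====
-- def group_and_sort(numbers):
--     # One global sort, then a single partition pass: each bucket comes out
--     # already ascending, so no per-group sort is needed.
--     buckets = {}
--     for v in sorted(numbers):
--         buckets.setdefault(v % 10, []).append(v)
--     return [buckets[k] for k in sorted(buckets)]
-- ===== Notes on version B (the rewrite author's own statement) =====
-- stated objective: alternative
-- what changed: Replaces group-first-then-sort-each-group with one global sort followed by a single partition pass (buckets are ascending by construction, so the per-group sorts disappear).
import Mathlib
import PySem

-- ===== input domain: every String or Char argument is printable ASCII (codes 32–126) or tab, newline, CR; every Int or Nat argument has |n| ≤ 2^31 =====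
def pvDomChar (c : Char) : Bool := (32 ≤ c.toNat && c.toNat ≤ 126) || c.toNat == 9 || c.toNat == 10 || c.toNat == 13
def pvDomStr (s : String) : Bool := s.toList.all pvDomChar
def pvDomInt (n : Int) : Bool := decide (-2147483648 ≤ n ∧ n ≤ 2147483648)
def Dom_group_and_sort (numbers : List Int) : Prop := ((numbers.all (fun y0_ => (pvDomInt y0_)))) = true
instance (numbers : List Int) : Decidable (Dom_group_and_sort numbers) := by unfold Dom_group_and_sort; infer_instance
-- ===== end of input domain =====

-- B replaces "group first, then sort each group" by one global sort followed by a single partition pass (alternative decomposition, same cost).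

-- ===== PORT A =====
-- groups = {}; for number in numbers: last_digit = number % 10; append or start the group
def pvGroups (numbers : List Int) : PySem.Dict Int (List Int) :=
  numbers.foldl
    (fun d number =>
      if d.contains (PySem.Int.mod number 10) then
        d.modify (PySem.Int.mod number 10) [] (fun v => v ++ [number])   -- groups[last_digit].append(number)
      else
        d.insert (PySem.Int.mod number 10) [number])                     -- groups[last_digit] = [number]
    PySem.Dict.empty

-- for key in groups: groups[key].sort()
def pvGroupsSorted (numbers : List Int) : PySem.Dict Int (List Int) :=
  (pvGroups numbers).keys.foldl
    (fun d key => d.modify key [] (fun v => PySem.List.sorted v (fun x => x) false))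
    (pvGroups numbers)

def group_and_sort (numbers : List Int) : List (List Int) :=
  -- [groups[key] for key in sorted(groups.keys())]
  (PySem.List.sorted (pvGroupsSorted numbers).keys (fun x => x) false).map
    (fun key => (pvGroupsSorted numbers).getD key [])

-- ===== PORT B =====
-- buckets = {}; for v in sorted(numbers): buckets.setdefault(v % 10, []).append(v)
def pvBuckets (numbers : List Int) : PySem.Dict Int (List Int) :=
  (PySem.List.sorted numbers (fun x => x) false).foldl
    (fun d v => d.modify (PySem.Int.mod v 10) [] (fun b => b ++ [v]))
    PySem.Dict.empty

def group_and_sort_alt (numbers : List Int) : List (List Int) :=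
  -- [buckets[k] for k in sorted(buckets)]
  (PySem.List.sorted (pvBuckets numbers).keys (fun x => x) false).map
    (fun k => (pvBuckets numbers).getD k [])

-- ===== PRECONDITION & SPEC =====
def Spec_group_and_sort (numbers : List Int) (out : List (List Int)) : Prop := out = group_and_sort_alt numbers
instance (numbers : List Int) (out : List (List Int)) : Decidable (Spec_group_and_sort numbers out) := by unfold Spec_group_and_sort; infer_instance

-- ===== CLAIM (what is proved, stated in full; the proofs are below) =====
def Claim_equal_group_and_sort : Prop := ∀ (numbers : List Int), Dom_group_and_sort numbers → Spec_group_and_sort numbers (group_and_sort numbers)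

-- ===== LEMMAS AND PROOFS =====

-- The common grouping step: append the value to the bucket of its last digit.
def pvStep (d : PySem.Dict Int (List Int)) (v : Int) : PySem.Dict Int (List Int) :=
  d.insert (PySem.Int.mod v 10) (d.getD (PySem.Int.mod v 10) [] ++ [v])

-- A's branching loop body is extensionally pvStep.
lemma stepA_eq_pvStep (d : PySem.Dict Int (List Int)) (n : Int) :
    (let last_digit := PySem.Int.mod n 10;
     if d.contains last_digit then d.modify last_digit [] (fun v => v ++ [n])
     else d.insert last_digit [n]) = pvStep d n := by
  unfold pvStep
  by_cases h : d.contains (PySem.Int.mod n 10)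
  · simp only [h, if_true]; rfl
  · simp only [Bool.not_eq_true] at h
    simp only [h, Bool.false_eq_true, if_false]
    rw [PySem.Dict.getD_of_not_contains _ _ h]
    rfl

lemma getD_fold_pvStep (l : List Int) (d : PySem.Dict Int (List Int)) (r : Int) :
    (l.foldl pvStep d).getD r [] = d.getD r [] ++ l.filter (fun n => PySem.Int.mod n 10 == r) := by
  induction l generalizing d with
  | nil => simp
  | cons x t ih =>
    simp only [List.foldl_cons, List.filter_cons, ih]
    unfold pvStep
    rw [PySem.Dict.getD_insert]
    simp only [eq_comm (a := r), beq_iff_eq]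
    split_ifs with h
    · rw [h]; simp
    · simp

lemma keys_fold_pvStep (l : List Int) (d : PySem.Dict Int (List Int)) :
    (l.foldl pvStep d).keys = PySem.Set.update d.keys (l.map (fun n => PySem.Int.mod n 10)) :=
  PySem.Dict.keys_foldl_insert_key l (fun n => PySem.Int.mod n 10)
    (fun d n => d.getD (PySem.Int.mod n 10) [] ++ [n]) d

-- A's second loop sorts each bucket in place (keys unchanged, values sorted).
lemma getD_sortloop (ks : List Int) (d : PySem.Dict Int (List Int)) (hnd : ks.Nodup) (r : Int) :
    (ks.foldl (fun d key => d.modify key [] (fun v => PySem.List.sorted v (fun x => x) false)) d).getD r []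
      = if r ∈ ks then PySem.List.sorted (d.getD r []) (fun x => x) false else d.getD r [] := by
  induction ks generalizing d with
  | nil => simp
  | cons k t ih =>
    simp only [List.foldl_cons, List.mem_cons]
    rw [ih _ (List.Nodup.of_cons hnd)]
    by_cases h : r = k
    · subst h
      have hr : r ∉ t := (List.nodup_cons.mp hnd).1
      simp [hr, PySem.Dict.getD_modify_self]
    · rw [PySem.Dict.getD_modify_of_ne (hne := h)]
      by_cases h2 : r ∈ t <;> simp [h, h2]

lemma keys_sortloop (ks : List Int) (d : PySem.Dict Int (List Int))
    (hsub : ∀ k ∈ ks, d.contains k = true) :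
    (ks.foldl (fun d key => d.modify key [] (fun v => PySem.List.sorted v (fun x => x) false)) d).keys = d.keys := by
  induction ks generalizing d with
  | nil => rfl
  | cons k t ih =>
    rw [List.foldl_cons, ih]
    · exact PySem.Dict.keys_insert_of_contains d _ (hsub k (by simp))
    · intro k' hk'
      simp [PySem.Dict.contains_modify, hsub k' (by simp [hk'])]

-- filtering a globally sorted list is sorting the filtered list
lemma filter_sorted_eq_sorted_filter (xs : List Int) (p : Int → Bool) :
    (PySem.List.sorted xs (fun x => x) false).filter p
      = PySem.List.sorted (xs.filter p) (fun x => x) false := by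
  apply PySem.List.eq_of_perm_of_pairwise_le_of_injective (fun x => x) (fun a b h => h)
  · exact ((PySem.List.sorted_perm xs (fun x => x) false).filter p).trans
      (PySem.List.sorted_perm (xs.filter p) (fun x => x) false).symm
  · exact (PySem.List.sorted_pairwise xs (fun x => x)).filter p
  · exact PySem.List.sorted_pairwise (xs.filter p) (fun x => x)

-- ===== VERDICT (by name: the statement is the Claim_ definition above) =====
theorem group_and_sort_spec : Claim_equal_group_and_sort := by
  intro numbers _
  unfold Spec_group_and_sort group_and_sort group_and_sort_alt pvGroupsSorted pvBuckets
  have hfold : pvGroups numbers = numbers.foldl pvStep PySem.Dict.empty :=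
    PySem.List.foldl_congr_mem numbers _ _ _ (fun acc x _ => stepA_eq_pvStep acc x)
  rw [hfold, show (fun (d : PySem.Dict Int (List Int)) (v : Int) =>
        d.modify (PySem.Int.mod v 10) [] (fun b => b ++ [v])) = pvStep from rfl]
  set A1 := numbers.foldl pvStep PySem.Dict.empty with hA1
  set B1 := (PySem.List.sorted numbers (fun x => x) false).foldl pvStep PySem.Dict.empty with hB1
  -- key sets
  have hKA : A1.keys = PySem.Set.ofList (numbers.map (fun n => PySem.Int.mod n 10)) := by
    rw [hA1, keys_fold_pvStep]; rfl
  have hKB : B1.keys = PySem.Set.ofList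
      ((PySem.List.sorted numbers (fun x => x) false).map (fun n => PySem.Int.mod n 10)) := by
    rw [hB1, keys_fold_pvStep]; rfl
  have hndA : A1.keys.Nodup := by
    rw [hKA]; exact PySem.Set.nodup_ofList _
  have hsub : ∀ k ∈ A1.keys, A1.contains k = true := by
    intro k hk; exact (PySem.Dict.contains_iff_mem_keys A1 k).mpr hk
  rw [keys_sortloop A1.keys A1 hsub]
  -- the two sorted key lists coincide
  have hkeys : PySem.List.sorted A1.keys (fun x => x) false
      = PySem.List.sorted B1.keys (fun x => x) false := by
    rw [PySem.List.sorted_id_eq_sorted_id_iff_perm, hKA, hKB]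
    refine (List.perm_ext_iff_of_nodup (PySem.Set.nodup_ofList _) (PySem.Set.nodup_ofList _)).mpr ?_
    intro a
    simp only [PySem.Set.mem_ofList, List.mem_map]
    constructor <;> rintro ⟨n, hn, rfl⟩
    · exact ⟨n, ((PySem.List.sorted_perm numbers (fun x => x) false).mem_iff).mpr hn, rfl⟩
    · exact ⟨n, ((PySem.List.sorted_perm numbers (fun x => x) false).mem_iff).mp hn, rfl⟩
  rw [hkeys]
  -- the bucket read at each listed key coincides
  apply List.map_congr_left
  intro r hr
  have hrA : r ∈ A1.keys := by
    have hb : r ∈ B1.keys := ((PySem.List.sorted_perm B1.keys (fun x => x) false).mem_iff).mp hr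
    rw [hKB] at hb; rw [hKA]
    simp only [PySem.Set.mem_ofList, List.mem_map] at hb ⊢
    obtain ⟨n, hn, rfl⟩ := hb
    exact ⟨n, ((PySem.List.sorted_perm numbers (fun x => x) false).mem_iff).mp hn, rfl⟩
  rw [getD_sortloop A1.keys A1 hndA r, if_pos hrA, hA1, getD_fold_pvStep, hB1, getD_fold_pvStep]
  simp only [PySem.Dict.getD_empty, List.nil_append]
  exact (filter_sorted_eq_sorted_filter numbers (fun n => PySem.Int.mod n 10 == r)).symm
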